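-- pv_equiv track=rewrite | github.com/YzyLmc/keypoint_detection_methods | bparhmm/run_robomimic.py | labels_to_segments
-- ===== SOURCE A (Python) =====
-- def labels_to_segments(labels):
--     """
--     Convert a per-timestep label array into a dict of {(start, end): skill}.
--
--     Args:
--         labels: (T,) integer array of skill labels
--
--     Returns:
--         segments: dict mapping (start_time, end_time) -> skill_id
--     """
--     segments = {}
--     T = len(labels)
--     seg_start = 0
--     current_skill = labels[0]
--
--     for t in range(1, T):
--         if labels[t] != current_skill:
--             segments[(int(seg_start), int(t - 1))] = int(current_skill)
--             seg_start = t
--             current_skill = labels[t]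
--     # Last segment
--     segments[(int(seg_start), int(T - 1))] = int(current_skill)
--     return segments
-- ===== SOURCE B (Python) =====
-- def labels_to_segments(labels):
--     """
--     Convert a per-timestep label array into a dict of {(start, end): skill}.
--
--     Boundary-list decomposition: first collect every segment start in one pass,
--     then emit one segment per consecutive pair of boundaries.
--     """
--     T = len(labels)
--     starts = [0] + [t for t in range(1, T) if labels[t] != labels[t - 1]]
--     ends = starts[1:] + [T]
--     return {(int(s), int(e - 1)): int(labels[s]) for s, e in zip(starts, ends)}
-- ===== Notes on version B (the rewrite author's own statement) =====
-- stated objective: alternative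
-- what changed: Replaced A's single stateful scan (mutable seg_start/current_skill with dict inserts at each change) by a two-phase boundary decomposition: one pass collects all segment-start indices, then consecutive boundary pairs are zipped into the segment dict.
import Mathlib
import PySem

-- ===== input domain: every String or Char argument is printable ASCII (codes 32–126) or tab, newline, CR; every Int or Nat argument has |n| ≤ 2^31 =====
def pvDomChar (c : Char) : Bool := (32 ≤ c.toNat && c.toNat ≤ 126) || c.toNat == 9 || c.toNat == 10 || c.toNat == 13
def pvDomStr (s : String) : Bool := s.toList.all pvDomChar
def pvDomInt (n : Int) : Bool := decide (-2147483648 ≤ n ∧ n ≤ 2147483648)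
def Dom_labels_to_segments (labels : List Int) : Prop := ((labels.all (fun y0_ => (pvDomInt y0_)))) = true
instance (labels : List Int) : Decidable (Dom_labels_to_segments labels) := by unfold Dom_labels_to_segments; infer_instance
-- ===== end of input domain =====

-- B replaces A's single stateful scan by a boundary-list decomposition (collect all segment starts, then zip consecutive boundaries); same O(n) cost, identical return value on nonempty input.

-- ===== PORT A =====
-- loop body of A's 'for t in range(1, T)'; state = (segments, seg_start, current_skill)
def lstepA (labels : List Int) (st : PySem.Dict (Int × Int) Int × Int × Int) (t : Int) :
    PySem.Dict (Int × Int) Int × Int × Int :=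
  if PySem.List.pyGetD labels t 0 ≠ st.2.2 then
    (st.1.insert (st.2.1, t - 1) st.2.2, t, PySem.List.pyGetD labels t 0)
  else st

-- labels[0] is pyGetD with default 0: Pre_ requires labels ≠ [], so the default is never read
def labels_to_segments (labels : List Int) : List (Int × Int × Int) :=
  let T : Int := labels.length
  let st := (PySem.List.pyRange 1 T 1).foldl (lstepA labels)
    (PySem.Dict.empty, 0, PySem.List.pyGetD labels 0 0)
  ((st.1.insert (st.2.1, T - 1) st.2.2).items).map (fun p => (p.1.1, p.1.2, p.2))

-- ===== PORT B =====
-- boundary pass (starts), sentinel ends = starts[1:] + [T], then one segment per boundary pair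
def labels_to_segments_alt (labels : List Int) : List (Int × Int × Int) :=
  let T : Int := labels.length
  let starts : List Int := 0 :: (PySem.List.pyRange 1 T 1).filter
      (fun t => PySem.List.pyGetD labels t 0 != PySem.List.pyGetD labels (t - 1) 0)
  let ends : List Int := starts.tail ++ [T]
  (starts.zip ends).map (fun p => (p.1, p.2 - 1, PySem.List.pyGetD labels p.1 0))

-- ===== PRECONDITION & SPEC =====
-- Pre_ excludes only the empty list, on which Python A raises IndexError (labels[0]); B raises there too.
def Pre_labels_to_segments (labels : List Int) : Prop := labels ≠ []
instance (labels : List Int) : Decidable (Pre_labels_to_segments labels) := by unfold Pre_labels_to_segments; infer_instance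
def pvWitness_labels_to_segments : List Int := [1, 1, 2]

def Spec_labels_to_segments (labels : List Int) (out : List (Int × Int × Int)) : Prop := out = labels_to_segments_alt labels
instance (labels : List Int) (out : List (Int × Int × Int)) : Decidable (Spec_labels_to_segments labels out) := by unfold Spec_labels_to_segments; infer_instance

-- ===== CLAIM (what is proved, stated in full; the proofs are below) =====
def Claim_equal_labels_to_segments : Prop := ∀ (labels : List Int), Dom_labels_to_segments labels → Pre_labels_to_segments labels → Spec_labels_to_segments labels (labels_to_segments labels)

-- ===== LEMMAS AND PROOFS =====

-- every key of d starts strictly below s, so any key of the form (s, x) is fresh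
lemma notContains_of_keys_lt {d : PySem.Dict (Int × Int) Int} {s : Int}
    (h : ∀ p ∈ d.keys, p.1 < s) (x : Int) : d.contains (s, x) = false := by
  by_contra hc
  have : (s, x) ∈ d.keys := (PySem.Dict.contains_iff_mem_keys d (s, x)).mp
    (by revert hc; cases d.contains (s, x) <;> simp)
  exact absurd (h _ this) (by simp)

-- Loop invariant: from index k with state (d, s, c), where c is the label at both s and k-1
-- and every key of d starts strictly below s, A's remaining loop + final insert produces d's
-- items followed by exactly B's segments for the boundaries ≥ k (with s prepended as the open segment).
lemma loopA_eq (L : List Int) :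
    ∀ (m : Nat) (k : Int) (d : PySem.Dict (Int × Int) Int) (s c : Int),
    k + (m : Int) = (L.length : Int) → 1 ≤ k →
    c = PySem.List.pyGetD L (k - 1) 0 → c = PySem.List.pyGetD L s 0 →
    s < k → (∀ p ∈ d.keys, p.1 < s) →
    (let st := (PySem.List.pyRange k (L.length : Int) 1).foldl (lstepA L) (d, s, c)
     ((st.1.insert (st.2.1, (L.length : Int) - 1) st.2.2).items).map (fun p => (p.1.1, p.1.2, p.2)))
    = d.items.map (fun p => (p.1.1, p.1.2, p.2)) ++
      (let F := (PySem.List.pyRange k (L.length : Int) 1).filter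
          (fun t => PySem.List.pyGetD L t 0 != PySem.List.pyGetD L (t - 1) 0)
       ((s :: F).zip (F ++ [(L.length : Int)])).map
          (fun p => (p.1, p.2 - 1, PySem.List.pyGetD L p.1 0))) := by
  intro m
  induction m with
  | zero =>
    intro k d s c hk h1 hc1 hcs hsk hkeys
    have hkn : k = (L.length : Int) := by omega
    subst hkn
    rw [PySem.List.pyRange_one_eq_nil (le_refl _)]
    simp only [List.foldl_nil, List.filter_nil, List.nil_append]
    rw [PySem.Dict.items_insert_of_not_contains _ _ (notContains_of_keys_lt hkeys _)]
    simp [hcs]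
  | succ m ih =>
    intro k d s c hk h1 hc1 hcs hsk hkeys
    have hlt : k < (L.length : Int) := by omega
    rw [PySem.List.pyRange_one_cons hlt]
    simp only [List.foldl_cons, List.filter_cons]
    by_cases hb : PySem.List.pyGetD L k 0 = c
    · have hbne : (PySem.List.pyGetD L k 0 != PySem.List.pyGetD L (k - 1) 0) = false := by
        simp [hb, ← hc1]
      rw [hbne]
      simp only [Bool.false_eq_true, if_false]
      have hstep : lstepA L (d, s, c) k = (d, s, c) := by
        simp [lstepA, hb]
      rw [hstep]
      exact ih (k + 1) d s c (by omega) (by omega)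
        (by simpa [show k + 1 - 1 = k by ring] using hb.symm) hcs (by omega) hkeys
    · have hbne : (PySem.List.pyGetD L k 0 != PySem.List.pyGetD L (k - 1) 0) = true := by
        simp [← hc1, hb]
      rw [hbne]
      simp only [if_true]
      have hstep : lstepA L (d, s, c) k
          = (d.insert (s, k - 1) c, k, PySem.List.pyGetD L k 0) := by
        simp [lstepA, hb]
      rw [hstep]
      have hkeys' : ∀ p ∈ (d.insert (s, k - 1) c).keys, p.1 < k := by
        intro p hp
        rcases (PySem.Dict.mem_keys_insert _ _ _ _).mp hp with h | h
        · subst h; omega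
        · exact lt_trans (hkeys p h) hsk
      have := ih (k + 1) (d.insert (s, k - 1) c) k (PySem.List.pyGetD L k 0)
        (by omega) (by omega) (by simp [show k + 1 - 1 = k by ring]) rfl (by omega) hkeys'
      rw [this]
      rw [PySem.Dict.items_insert_of_not_contains _ _ (notContains_of_keys_lt hkeys _)]
      simp [hcs, List.zip_cons_cons]

-- ===== VERDICT (by name: the statement is the Claim_ definition above) =====
theorem labels_to_segments_spec : Claim_equal_labels_to_segments := by
  intro labels _ hpre
  unfold Spec_labels_to_segments
  have hlen : 1 ≤ labels.length := List.length_pos_iff.mpr hpre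
  have := loopA_eq labels (labels.length - 1) 1 PySem.Dict.empty 0
    (PySem.List.pyGetD labels 0 0) (by omega) (by omega) (by norm_num) rfl
    (by omega) (by simp [PySem.Dict.keys_empty])
  simp only [labels_to_segments, labels_to_segments_alt]
  simpa [PySem.Dict.items, PySem.Dict.empty] using this
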